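-- pv_equiv track=rewrite | github.com/bnks011/lol-telegram-bot | lol_esports_telegram_bot.py | _extract_from_participants
-- ===== SOURCE A (Python) =====
-- from typing import Dict, List, Optional
--
-- def _extract_from_participants(participants: List[Dict]) -> tuple:
--     """Extrai de participants quando blueTeam/redTeam não existem"""
--     blue = {'totalGold': 0, 'totalKills': 0}
--     red = {'totalGold': 0, 'totalKills': 0}
--
--     for p in participants:
--         team_id = p.get('teamId', 0)
--         if team_id == 100:  # Blue
--             blue['totalGold'] += p.get('totalGold', 0)
--             blue['totalKills'] += p.get('kills', 0)
--         elif team_id == 200:  # Red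
--             red['totalGold'] += p.get('totalGold', 0)
--             red['totalKills'] += p.get('kills', 0)
--
--     return blue, red
-- ===== SOURCE B (Python) =====
-- from typing import Dict, List, Optional
--
-- def _extract_from_participants(participants: List[Dict]) -> tuple:
--     """Extrai de participants quando blueTeam/redTeam nao existem"""
--     blue = {
--         'totalGold': sum(p.get('totalGold', 0) for p in participants if p.get('teamId', 0) == 100),
--         'totalKills': sum(p.get('kills', 0) for p in participants if p.get('teamId', 0) == 100),
--     }
--     red = {
--         'totalGold': sum(p.get('totalGold', 0) for p in participants if p.get('teamId', 0) == 200),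
--         'totalKills': sum(p.get('kills', 0) for p in participants if p.get('teamId', 0) == 200),
--     }
--     return blue, red
-- ===== Notes on version B (the rewrite author's own statement) =====
-- stated objective: simpler
-- what changed: Replaces the single branching accumulate loop over mutable team dicts with four independent filtered generator-expression sums that build each team dict directly.
import Mathlib
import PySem

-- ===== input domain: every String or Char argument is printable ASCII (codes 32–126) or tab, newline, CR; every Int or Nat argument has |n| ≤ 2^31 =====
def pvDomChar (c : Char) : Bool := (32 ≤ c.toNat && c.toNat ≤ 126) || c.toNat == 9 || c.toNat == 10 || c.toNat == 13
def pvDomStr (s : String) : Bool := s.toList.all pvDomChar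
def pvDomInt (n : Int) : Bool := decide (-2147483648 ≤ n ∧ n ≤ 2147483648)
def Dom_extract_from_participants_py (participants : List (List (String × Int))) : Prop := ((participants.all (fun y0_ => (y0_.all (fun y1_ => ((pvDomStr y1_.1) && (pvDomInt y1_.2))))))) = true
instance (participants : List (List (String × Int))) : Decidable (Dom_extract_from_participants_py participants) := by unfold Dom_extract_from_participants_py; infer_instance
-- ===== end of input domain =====

-- B replaces A's single branching loop over two mutable dicts by four independent
-- filtered sums (one per team/field), built directly into the result dicts; same cost, simpler decomposition.

-- ===== PORT A =====
-- the body of A's for-loop (one participant, state = (blue, red))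
def pvStepA (st : PySem.Dict String Int × PySem.Dict String Int) (p : List (String × Int)) :
    PySem.Dict String Int × PySem.Dict String Int :=
  let pd := PySem.Dict.mk p
  let team_id := pd.getD "teamId" 0
  if team_id = 100 then
    let b := st.1.insert "totalGold" (st.1.getD "totalGold" 0 + pd.getD "totalGold" 0)
    let b := b.insert "totalKills" (b.getD "totalKills" 0 + pd.getD "kills" 0)
    (b, st.2)
  else if team_id = 200 then
    let r := st.2.insert "totalGold" (st.2.getD "totalGold" 0 + pd.getD "totalGold" 0)
    let r := r.insert "totalKills" (r.getD "totalKills" 0 + pd.getD "kills" 0)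
    (st.1, r)
  else st

def extract_from_participants_py (participants : List (List (String × Int))) : (List (String × Int)) × (List (String × Int)) :=
  let blue : PySem.Dict String Int := PySem.Dict.mk [("totalGold", 0), ("totalKills", 0)]
  let red : PySem.Dict String Int := PySem.Dict.mk [("totalGold", 0), ("totalKills", 0)]
  let st := participants.foldl pvStepA (blue, red)
  (st.1.items, st.2.items)

-- ===== PORT B =====
-- one filtered-sum per field, as in Source B's generator expressions
def pvTeamSum (participants : List (List (String × Int))) (tid : Int) (key : String) : Int :=
  ((participants.filter (fun p => (PySem.Dict.mk p).getD "teamId" 0 = tid)).map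
    (fun p => (PySem.Dict.mk p).getD key 0)).sum

def extract_from_participants_py_alt (participants : List (List (String × Int))) : (List (String × Int)) × (List (String × Int)) :=
  ([("totalGold", pvTeamSum participants 100 "totalGold"),
    ("totalKills", pvTeamSum participants 100 "kills")],
   [("totalGold", pvTeamSum participants 200 "totalGold"),
    ("totalKills", pvTeamSum participants 200 "kills")])

-- ===== PRECONDITION & SPEC =====
def Spec_extract_from_participants_py (participants : List (List (String × Int))) (out : (List (String × Int)) × (List (String × Int))) : Prop := out = extract_from_participants_py_alt participants
instance (participants : List (List (String × Int))) (out : (List (String × Int)) × (List (String × Int))) : Decidable (Spec_extract_from_participants_py participants out) := by unfold Spec_extract_from_participants_py; infer_instance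

-- ===== CLAIM (what is proved, stated in full; the proofs are below) =====
def Claim_equal_extract_from_participants_py : Prop := ∀ (participants : List (List (String × Int))), Dom_extract_from_participants_py participants → Spec_extract_from_participants_py participants (extract_from_participants_py participants)

-- ===== LEMMAS AND PROOFS =====
theorem pvGetD_gold (g k : Int) :
    (PySem.Dict.mk [("totalGold", g), ("totalKills", k)]).getD "totalGold" 0 = g := by
  simp [PySem.Dict.getD, PySem.Dict.get?]

theorem pvGetD_kills (g k : Int) :
    (PySem.Dict.mk [("totalGold", g), ("totalKills", k)]).getD "totalKills" 0 = k := by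
  simp [PySem.Dict.getD, PySem.Dict.get?]

theorem pvIns_gold (g k v : Int) :
    (PySem.Dict.mk [("totalGold", g), ("totalKills", k)]).insert "totalGold" v
      = PySem.Dict.mk [("totalGold", v), ("totalKills", k)] := by
  simp [PySem.Dict.insert, PySem.Dict.contains]

theorem pvIns_kills (g k v : Int) :
    (PySem.Dict.mk [("totalGold", g), ("totalKills", k)]).insert "totalKills" v
      = PySem.Dict.mk [("totalGold", g), ("totalKills", v)] := by
  simp [PySem.Dict.insert, PySem.Dict.contains]

theorem pvStepA_eq (bg bk rg rk : Int) (p : List (String × Int)) :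
    pvStepA (PySem.Dict.mk [("totalGold", bg), ("totalKills", bk)],
             PySem.Dict.mk [("totalGold", rg), ("totalKills", rk)]) p
    = (if (PySem.Dict.mk p).getD "teamId" 0 = 100 then
         (PySem.Dict.mk [("totalGold", bg + (PySem.Dict.mk p).getD "totalGold" 0),
                         ("totalKills", bk + (PySem.Dict.mk p).getD "kills" 0)],
          PySem.Dict.mk [("totalGold", rg), ("totalKills", rk)])
       else if (PySem.Dict.mk p).getD "teamId" 0 = 200 then
         (PySem.Dict.mk [("totalGold", bg), ("totalKills", bk)],
          PySem.Dict.mk [("totalGold", rg + (PySem.Dict.mk p).getD "totalGold" 0),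
                         ("totalKills", rk + (PySem.Dict.mk p).getD "kills" 0)])
       else
         (PySem.Dict.mk [("totalGold", bg), ("totalKills", bk)],
          PySem.Dict.mk [("totalGold", rg), ("totalKills", rk)])) := by
  unfold pvStepA
  by_cases h1 : (PySem.Dict.mk p).getD "teamId" 0 = 100
  · simp [h1, pvGetD_gold, pvGetD_kills, pvIns_gold, pvIns_kills]
  · by_cases h2 : (PySem.Dict.mk p).getD "teamId" 0 = 200
    · simp [h2, pvGetD_gold, pvGetD_kills, pvIns_gold, pvIns_kills]
    · simp [h1, h2]

theorem pvLoop (l : List (List (String × Int))) (bg bk rg rk : Int) :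
    l.foldl pvStepA
      (PySem.Dict.mk [("totalGold", bg), ("totalKills", bk)],
       PySem.Dict.mk [("totalGold", rg), ("totalKills", rk)])
    = (PySem.Dict.mk [("totalGold", bg + pvTeamSum l 100 "totalGold"),
                      ("totalKills", bk + pvTeamSum l 100 "kills")],
       PySem.Dict.mk [("totalGold", rg + pvTeamSum l 200 "totalGold"),
                      ("totalKills", rk + pvTeamSum l 200 "kills")]) := by
  induction l generalizing bg bk rg rk with
  | nil => simp [pvTeamSum]
  | cons p t ih =>
    rw [List.foldl_cons, pvStepA_eq]
    by_cases h1 : (PySem.Dict.mk p).getD "teamId" 0 = 100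
    · rw [if_pos h1, ih]
      simp [pvTeamSum, h1, add_assoc]
    · rw [if_neg h1]
      by_cases h2 : (PySem.Dict.mk p).getD "teamId" 0 = 200
      · rw [if_pos h2, ih]
        simp [pvTeamSum, h2, add_assoc]
      · rw [if_neg h2, ih]
        simp [pvTeamSum, h1, h2]

-- ===== VERDICT (by name: the statement is the Claim_ definition above) =====
theorem extract_from_participants_py_spec : Claim_equal_extract_from_participants_py := by
  intro participants _
  show extract_from_participants_py participants = extract_from_participants_py_alt participants
  unfold extract_from_participants_py
  simp only [pvLoop]
  simp [extract_from_participants_py_alt]
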